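-- pv_equiv track=rewrite | github.com/Mwoodring2/Meshfinder | scripts/render_posters_blender.py | guess_mesh_col
-- ===== SOURCE A (Python) =====
-- def guess_mesh_col(cols):
--     # Prefer any column containing 'glb' then 'path'
--     for c in cols:
--         lc = c.lower()
--         if "glb" in lc and "path" in lc:
--             return c
--     for c in cols:
--         if c.lower() == "glb_path":
--             return c
--     for c in cols:
--         if c.lower() == "path":
--             return c
--     # fallbacks people commonly use
--     for c in cols:
--         if "file" in c.lower() or "relpath" in c.lower():
--             return c
--     return None
-- ===== SOURCE B (Python) =====
-- def guess_mesh_col(cols):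
--     # One pass: give each column its best (lowest) matching priority and keep
--     # the earliest column with the overall lowest priority.
--     def prio(c):
--         lc = c.lower()
--         if "glb" in lc and "path" in lc:
--             return 1
--         if lc == "glb_path":
--             return 2
--         if lc == "path":
--             return 3
--         if "file" in lc or "relpath" in lc:
--             return 4
--         return None
--
--     best = None  # (priority, column)
--     for c in cols:
--         p = prio(c)
--         if p is not None and (best is None or p < best[0]):
--             best = (p, c)
--     return best[1] if best is not None else None
-- ===== Notes on version B (the rewrite author's own statement) =====
-- stated objective: alternative
-- what changed: Replaced A's four sequential full scans of cols (one per priority level) by a single pass that assigns each column its minimal matching priority and keeps the earliest lowest-priority candidate via a strictly-better-only accumulator update.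
import Mathlib
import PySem

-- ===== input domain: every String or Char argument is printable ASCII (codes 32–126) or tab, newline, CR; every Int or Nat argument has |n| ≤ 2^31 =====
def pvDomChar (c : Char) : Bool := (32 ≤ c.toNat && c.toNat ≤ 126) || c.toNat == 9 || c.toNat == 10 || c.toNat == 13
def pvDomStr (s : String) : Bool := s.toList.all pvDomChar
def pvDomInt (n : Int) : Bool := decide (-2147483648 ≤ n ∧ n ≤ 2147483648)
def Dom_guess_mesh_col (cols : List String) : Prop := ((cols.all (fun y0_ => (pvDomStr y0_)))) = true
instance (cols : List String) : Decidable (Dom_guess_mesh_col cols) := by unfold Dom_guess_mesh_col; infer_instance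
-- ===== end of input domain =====

-- B replaces A's four sequential scans by one accumulator pass (same result, alternative structure).

-- ===== PORT A =====
-- four sequential early-return scans, each ported as List.find? over the whole list
def guess_mesh_col (cols : List String) : Option String :=
  match cols.find? (fun c =>
      let lc := PySem.Str.lower c
      PySem.Str.isIn "glb" lc && PySem.Str.isIn "path" lc) with
  | some c => some c
  | none =>
    match cols.find? (fun c => PySem.Str.lower c == "glb_path") with
    | some c => some c
    | none =>
      match cols.find? (fun c => PySem.Str.lower c == "path") with
      | some c => some c
      | none =>
        match cols.find? (fun c =>
            PySem.Str.isIn "file" (PySem.Str.lower c) || PySem.Str.isIn "relpath" (PySem.Str.lower c)) with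
        | some c => some c
        | none => none

-- ===== PORT B =====
-- single pass: minimal matching priority per column, keep earliest strictly-best candidate
def guess_mesh_col_alt (cols : List String) : Option String :=
  let prio := fun (c : String) =>
    let lc := PySem.Str.lower c
    if PySem.Str.isIn "glb" lc && PySem.Str.isIn "path" lc then some (1 : Nat)
    else if lc == "glb_path" then some 2
    else if lc == "path" then some 3
    else if PySem.Str.isIn "file" lc || PySem.Str.isIn "relpath" lc then some 4
    else none
  let best := cols.foldl (fun best c =>
    match prio c with
    | none => best
    | some p =>
      match best with
      | none => some (p, c)
      | some (q, _) => if p < q then some (p, c) else best) none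
  best.map (·.2)

-- ===== PRECONDITION & SPEC =====
def Spec_guess_mesh_col (cols : List String) (out : Option String) : Prop := out = guess_mesh_col_alt cols
instance (cols : List String) (out : Option String) : Decidable (Spec_guess_mesh_col cols out) := by unfold Spec_guess_mesh_col; infer_instance

-- ===== CLAIM (what is proved, stated in full; the proofs are below) =====
def Claim_equal_guess_mesh_col : Prop := ∀ (cols : List String), Dom_guess_mesh_col cols → Spec_guess_mesh_col cols (guess_mesh_col cols)

-- ===== LEMMAS AND PROOFS =====

def pvP1 (c : String) : Bool :=
  PySem.Str.isIn "glb" (PySem.Str.lower c) && PySem.Str.isIn "path" (PySem.Str.lower c)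
def pvP2 (c : String) : Bool := PySem.Str.lower c == "glb_path"
def pvP3 (c : String) : Bool := PySem.Str.lower c == "path"
def pvP4 (c : String) : Bool :=
  PySem.Str.isIn "file" (PySem.Str.lower c) || PySem.Str.isIn "relpath" (PySem.Str.lower c)

def pvPrio (c : String) : Option Nat :=
  if pvP1 c then some 1 else if pvP2 c then some 2 else if pvP3 c then some 3
  else if pvP4 c then some 4 else none

def pvSingle (c : String) : Option (Nat × String) := (pvPrio c).map (fun p => (p, c))

def pvCombine (b r : Option (Nat × String)) : Option (Nat × String) :=
  match r with
  | none => b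
  | some (p, c) =>
    match b with
    | none => some (p, c)
    | some (q, _) => if p < q then some (p, c) else b

def pvStep (b : Option (Nat × String)) (c : String) : Option (Nat × String) :=
  match pvPrio c with
  | none => b
  | some p =>
    match b with
    | none => some (p, c)
    | some (q, _) => if p < q then some (p, c) else b

def pvN (cols : List String) : Option (Nat × String) :=
  match cols.find? pvP1 with
  | some c => some (1, c)
  | none =>
    match cols.find? pvP2 with
    | some c => some (2, c)
    | none =>
      match cols.find? pvP3 with
      | some c => some (3, c)
      | none => (cols.find? pvP4).map (fun c => (4, c))

lemma pvStep_eq_combine (b : Option (Nat × String)) (c : String) :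
    pvStep b c = pvCombine b (pvSingle c) := by
  unfold pvStep pvCombine pvSingle
  cases pvPrio c <;> rfl

lemma pvCombine_none_left (r : Option (Nat × String)) : pvCombine none r = r := by
  rcases r with _ | ⟨p, c⟩ <;> rfl

lemma pvN_bound (cols : List String) (q : Nat) (s : String) (h : pvN cols = some (q, s)) :
    1 ≤ q := by
  unfold pvN at h
  repeat' split at h
  all_goals simp_all [Option.map_eq_some_iff]
  all_goals omega

lemma pvCombine_assoc (a b d : Option (Nat × String)) :
    pvCombine (pvCombine a b) d = pvCombine a (pvCombine b d) := by
  rcases a with _ | ⟨p, x⟩ <;> rcases b with _ | ⟨q, y⟩ <;> rcases d with _ | ⟨r, z⟩ <;>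
    simp only [pvCombine] <;> split_ifs <;> simp_all <;>
      first | omega | (split_ifs <;> simp_all <;> omega)

lemma pvN_cons (c : String) (cs : List String) :
    pvN (c :: cs) = pvCombine (pvSingle c) (pvN cs) := by
  by_cases h1 : pvP1 c
  · have : pvN (c :: cs) = some (1, c) := by simp [pvN, h1]
    rw [this]
    rcases hN : pvN cs with _ | ⟨q, s⟩
    · simp [pvCombine, pvSingle, pvPrio, h1]
    · have hq := pvN_bound cs q s hN
      simp [pvCombine, pvSingle, pvPrio, h1]
      omega
  · by_cases h2 : pvP2 c
    · simp only [pvN, List.find?_cons, h1, pvSingle, pvPrio, h2, if_true]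
      rcases hf1 : cs.find? pvP1 with _ | d
      · rcases hf2 : cs.find? pvP2 with _ | d <;>
          rcases hf3 : cs.find? pvP3 with _ | e <;>
          rcases hf4 : cs.find? pvP4 with _ | f <;> simp [pvCombine]
      · simp [pvCombine]
    · by_cases h3 : pvP3 c
      · simp only [pvN, List.find?_cons, h1, h2, pvSingle, pvPrio, h3, if_true]
        rcases hf1 : cs.find? pvP1 with _ | d
        · rcases hf2 : cs.find? pvP2 with _ | d
          · rcases hf3 : cs.find? pvP3 with _ | e <;>
              rcases hf4 : cs.find? pvP4 with _ | f <;> simp [pvCombine]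
          · simp [pvCombine]
        · simp [pvCombine]
      · by_cases h4 : pvP4 c
        · simp only [pvN, List.find?_cons, h1, h2, h3, pvSingle, pvPrio, h4, if_true]
          rcases hf1 : cs.find? pvP1 with _ | d
          · rcases hf2 : cs.find? pvP2 with _ | d
            · rcases hf3 : cs.find? pvP3 with _ | e
              · rcases hf4 : cs.find? pvP4 with _ | f <;> simp [pvCombine]
              · simp [pvCombine]
            · simp [pvCombine]
          · simp [pvCombine]
        · have hs : pvSingle c = none := by simp [pvSingle, pvPrio, h1, h2, h3, h4]
          rw [hs, pvCombine_none_left]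
          simp [pvN, h1, h2, h3, h4]

lemma pvFoldl_eq (cols : List String) : ∀ b : Option (Nat × String),
    cols.foldl pvStep b = pvCombine b (pvN cols) := by
  induction cols with
  | nil => intro b; simp [pvN, pvCombine]
  | cons c cs ih =>
    intro b
    rw [List.foldl_cons, ih, pvStep_eq_combine, pvCombine_assoc, ← pvN_cons]

lemma pvAlt_eq (cols : List String) :
    guess_mesh_col_alt cols = (pvN cols).map (·.2) := by
  have h : guess_mesh_col_alt cols = (cols.foldl pvStep none).map (·.2) := rfl
  rw [h, pvFoldl_eq, pvCombine_none_left]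

lemma pvA_eq (cols : List String) :
    guess_mesh_col cols = (pvN cols).map (·.2) := by
  have hA : guess_mesh_col cols =
      (match cols.find? pvP1 with
       | some c => some c
       | none =>
         match cols.find? pvP2 with
         | some c => some c
         | none =>
           match cols.find? pvP3 with
           | some c => some c
           | none =>
             match cols.find? pvP4 with
             | some c => some c
             | none => none) := rfl
  rw [hA]
  unfold pvN
  rcases cols.find? pvP1 with _ | d
  · rcases cols.find? pvP2 with _ | d
    · rcases cols.find? pvP3 with _ | d
      · rcases cols.find? pvP4 with _ | d <;> rfl
      · rfl
    · rfl
  · rfl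

-- ===== VERDICT (by name: the statement is the Claim_ definition above) =====
theorem guess_mesh_col_spec : Claim_equal_guess_mesh_col := by
  intro cols _
  unfold Spec_guess_mesh_col
  rw [pvA_eq, pvAlt_eq]
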